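-- pv_equiv track=rewrite | github.com/alyssahilgendorf/Individual-Coding-Project-Dance-Workout-Planner | main.py | connect_consecutive_duplicate_dances
-- ===== SOURCE A (Python) =====
-- def connect_consecutive_duplicate_dances(workout):
--     if len(workout) <= 1: # No need to connect if there's just 0 or 1 dances
--         return workout
--
--     # workout is a list of (dance, duration) tuples e.g. [("Zouk", 4), ("Zouk", 4), ("Salsa", 4)]
--     connected_workout = [workout[0]] # start with the first (dance, duration) tuple e.g. ("Zouk", 4) -> [("Zouk", 4)]
--     for i in range(1, len(workout)): # iterate through the original workout starting from the second dance
--         if workout[i][0] == connected_workout[-1][0]: # if the current dance name is the same as the last dance in the connected workout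
--
--             # update the last dance in connected_workout by adding the duration of the current dance to it ("Zouk", 4) + ("Zouk", 4) -> ("Zouk", 8)
--             connected_workout[-1] = (connected_workout[-1][0], connected_workout[-1][1] + workout[i][1])
--         else:
--
--             # otherwise add dance to the connected workout ("Salsa", 4) -> [("Zouk", 8), ("Salsa", 4)]
--             connected_workout.append(workout[i])
--
--     return connected_workout
-- ===== SOURCE B (Python) =====
-- def connect_consecutive_duplicate_dances(workout):
--     # Run-length grouping: scan each run of equal names once, emit one fresh tuple per run.
--     result = []
--     rest = workout
--     while rest:
--         name, total = rest[0]
--         k = 1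
--         while k < len(rest) and rest[k][0] == name:
--             total += rest[k][1]
--             k += 1
--         result.append((name, total))
--         rest = rest[k:]
--     return result
-- ===== Notes on version B (the rewrite author's own statement) =====
-- stated objective: alternative
-- what changed: B builds the answer by run-length grouping (an outer loop over runs with an inner scan that consumes each run and emits one fresh tuple), instead of A's single index loop that repeatedly rewrites the last element of the accumulator list.
import Mathlib
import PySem

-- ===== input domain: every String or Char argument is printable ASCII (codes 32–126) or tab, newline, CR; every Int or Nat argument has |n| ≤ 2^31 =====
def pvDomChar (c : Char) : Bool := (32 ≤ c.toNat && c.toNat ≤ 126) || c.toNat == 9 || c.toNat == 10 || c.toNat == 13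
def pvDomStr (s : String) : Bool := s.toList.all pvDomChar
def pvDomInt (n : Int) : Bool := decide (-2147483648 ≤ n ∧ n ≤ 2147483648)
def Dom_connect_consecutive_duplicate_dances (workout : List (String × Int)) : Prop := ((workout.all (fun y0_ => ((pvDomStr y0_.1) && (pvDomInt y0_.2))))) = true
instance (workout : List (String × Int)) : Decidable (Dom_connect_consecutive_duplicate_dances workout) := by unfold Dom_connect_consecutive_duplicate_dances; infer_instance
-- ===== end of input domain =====

-- B replaces A's last-element-rewriting accumulator loop with run-length grouping; alternative decomposition, same cost.
-- ===== PORT A =====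
def connect_consecutive_duplicate_dances (workout : List (String × Int)) : List (String × Int) :=
  if workout.length ≤ 1 then workout
  else
    (PySem.List.pyRange 1 (PySem.List.len workout) 1).foldl
      (fun acc i =>
        let w := PySem.List.pyGetD workout i ("", 0)
        let last := PySem.List.pyGetD acc (-1) ("", 0)
        if w.1 == last.1 then acc.dropLast ++ [(last.1, last.2 + w.2)]
        else acc ++ [w])
      [PySem.List.pyGetD workout 0 ("", 0)]

-- ===== PORT B =====
def connect_consecutive_duplicate_dances_alt : List (String × Int) → List (String × Int)
  | [] => []
  | (name, dur) :: rest =>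
      -- inner while: scan the run of equal names, accumulating total from dur
      let run := rest.takeWhile (fun p => p.1 == name)
      let total := run.foldl (fun s p => s + p.2) dur
      (name, total) :: connect_consecutive_duplicate_dances_alt (rest.dropWhile (fun p => p.1 == name))
  termination_by xs => xs.length
  decreasing_by
    simp only [List.length_cons]
    exact Nat.lt_succ_of_le (List.length_dropWhile_le _ rest)

-- ===== PRECONDITION & SPEC =====
def Spec_connect_consecutive_duplicate_dances (workout : List (String × Int)) (out : List (String × Int)) : Prop := out = connect_consecutive_duplicate_dances_alt workout
instance (workout : List (String × Int)) (out : List (String × Int)) : Decidable (Spec_connect_consecutive_duplicate_dances workout out) := by unfold Spec_connect_consecutive_duplicate_dances; infer_instance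

-- ===== CLAIM (what is proved, stated in full; the proofs are below) =====
def Claim_equal_connect_consecutive_duplicate_dances : Prop := ∀ (workout : List (String × Int)), Dom_connect_consecutive_duplicate_dances workout → Spec_connect_consecutive_duplicate_dances workout (connect_consecutive_duplicate_dances workout)

-- ===== LEMMAS AND PROOFS =====

-- merge recursion that characterises A's loop: current pending (nm, t) plus remaining input
def pvMergeGo (nm : String) (t : Int) : List (String × Int) → List (String × Int)
  | [] => [(nm, t)]
  | (n, d) :: rs => if n == nm then pvMergeGo nm (t + d) rs else (nm, t) :: pvMergeGo n d rs

-- A's fold, with accumulator init ++ [(nm, t)], equals init ++ the merge recursion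
theorem pvFoldA_eq (rest : List (String × Int)) :
    ∀ (init : List (String × Int)) (nm : String) (t : Int),
    rest.foldl
      (fun acc p =>
        let last := PySem.List.pyGetD acc (-1) ("", 0)
        if p.1 == last.1 then acc.dropLast ++ [(last.1, last.2 + p.2)]
        else acc ++ [p])
      (init ++ [(nm, t)]) = init ++ pvMergeGo nm t rest := by
  induction rest with
  | nil => intro init nm t; simp [pvMergeGo]
  | cons p rs ih =>
    intro init nm t
    obtain ⟨n, d⟩ := p
    simp only [List.foldl_cons, PySem.List.pyGetD_neg_one_append_singleton, pvMergeGo]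
    by_cases h : (n == nm) = true
    · simp only [h, List.dropLast_concat]
      exact ih init nm (t + d)
    · simp only [h]
      have := ih (init ++ [(nm, t)]) n d
      simpa using this
-- the merge recursion equals B's run-length grouping
theorem pvMergeGo_eq_alt (rest : List (String × Int)) :
    ∀ (nm : String) (t : Int),
    pvMergeGo nm t rest =
      (nm, (rest.takeWhile (fun p => p.1 == nm)).foldl (fun s p => s + p.2) t)
        :: connect_consecutive_duplicate_dances_alt (rest.dropWhile (fun p => p.1 == nm)) := by
  induction rest with
  | nil => intro nm t; simp [pvMergeGo, connect_consecutive_duplicate_dances_alt]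
  | cons p rs ih =>
    intro nm t
    obtain ⟨n, d⟩ := p
    by_cases h : (n == nm) = true
    · simp only [pvMergeGo, h, List.takeWhile_cons, List.dropWhile_cons, if_pos,
        List.foldl_cons]
      exact ih nm (t + d)
    · simp [pvMergeGo, h]
      conv_rhs => rw [connect_consecutive_duplicate_dances_alt]
      exact ih n d

-- ===== VERDICT (by name: the statement is the Claim_ definition above) =====
theorem connect_consecutive_duplicate_dances_spec : Claim_equal_connect_consecutive_duplicate_dances := by
  intro workout _
  unfold Spec_connect_consecutive_duplicate_dances
  match workout with
  | [] =>
    simp [connect_consecutive_duplicate_dances, connect_consecutive_duplicate_dances_alt]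
  | [(n, d)] =>
    simp [connect_consecutive_duplicate_dances, connect_consecutive_duplicate_dances_alt]
  | (n, d) :: q :: tl =>
    have hlen : ¬ ((n, d) :: q :: tl).length ≤ 1 := by simp
    unfold connect_consecutive_duplicate_dances
    rw [if_neg hlen]
    have hr := PySem.List.foldl_pyRange_pyGetD (xs := (n, d) :: q :: tl) (a := 1)
      (d := ("", 0))
      (f := fun acc (p : String × Int) =>
        let last := PySem.List.pyGetD acc (-1) ("", 0)
        if p.1 == last.1 then acc.dropLast ++ [(last.1, last.2 + p.2)]
        else acc ++ [p])
      (init := [PySem.List.pyGetD ((n, d) :: q :: tl) 0 ("", 0)]) (by norm_num)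
    simp only [PySem.List.pyGetD_zero_cons] at hr ⊢
    rw [hr]
    simp only [Int.toNat_one, List.drop_succ_cons, List.drop_zero]
    have := pvFoldA_eq (q :: tl) [] n d
    simp only [List.nil_append] at this
    rw [this, pvMergeGo_eq_alt]
    conv_rhs => rw [connect_consecutive_duplicate_dances_alt]
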